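-- pv_equiv track=rewrite | github.com/mohammadfaiizan/ProjectI | DSA/Problem/Queue_Stack/06_Advanced_Queue_Applications/649_Dota2_Senate.py | predictPartyVictory_queue_simulation
-- ===== SOURCE A (Python) =====
-- from collections import deque
--
-- def predictPartyVictory_queue_simulation(senate: str) -> str:
--     """
--     Approach 1: Queue Simulation (Optimal)
--
--     Use two queues to simulate the voting process.
--
--     Time: O(n), Space: O(n)
--     """
--     radiant = deque()
--     dire = deque()
--     n = len(senate)
--
--     # Initialize queues with positions
--     for i, party in enumerate(senate):
--         if party == 'R':
--             radiant.append(i)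
--         else:
--             dire.append(i)
--
--     # Simulate rounds
--     while radiant and dire:
--         r_pos = radiant.popleft()
--         d_pos = dire.popleft()
--
--         # The senator with smaller position acts first
--         if r_pos < d_pos:
--             # Radiant bans Dire, Radiant gets to vote again in next round
--             radiant.append(r_pos + n)
--         else:
--             # Dire bans Radiant, Dire gets to vote again in next round
--             dire.append(d_pos + n)
--
--     return "Radiant" if radiant else "Dire"
-- ===== SOURCE B (Python) =====
-- from collections import deque
--
-- def predictPartyVictory_queue_simulation(senate: str) -> str:
--     q = deque(senate)
--     r_ban = d_ban = 0
--     r_count = sum(1 for c in senate if c == 'R')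
--     d_count = len(senate) - r_count
--     while r_count > 0 and d_count > 0:
--         c = q.popleft()
--         if c == 'R':
--             if r_ban > 0:
--                 r_ban -= 1
--             else:
--                 d_ban += 1
--                 d_count -= 1
--                 q.append(c)
--         else:
--             if d_ban > 0:
--                 d_ban -= 1
--             else:
--                 r_ban += 1
--                 r_count -= 1
--                 q.append(c)
--     return "Radiant" if r_count > 0 else "Dire"
-- ===== Notes on version B (the rewrite author's own statement) =====
-- stated objective: idiomatic
-- what changed: Replaces A's two position-queues with index comparison and pos+n reinsertion by a single deque of party chars plus two pending-ban counters and surviving-party counts, so no positions are stored or compared.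
import Mathlib
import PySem

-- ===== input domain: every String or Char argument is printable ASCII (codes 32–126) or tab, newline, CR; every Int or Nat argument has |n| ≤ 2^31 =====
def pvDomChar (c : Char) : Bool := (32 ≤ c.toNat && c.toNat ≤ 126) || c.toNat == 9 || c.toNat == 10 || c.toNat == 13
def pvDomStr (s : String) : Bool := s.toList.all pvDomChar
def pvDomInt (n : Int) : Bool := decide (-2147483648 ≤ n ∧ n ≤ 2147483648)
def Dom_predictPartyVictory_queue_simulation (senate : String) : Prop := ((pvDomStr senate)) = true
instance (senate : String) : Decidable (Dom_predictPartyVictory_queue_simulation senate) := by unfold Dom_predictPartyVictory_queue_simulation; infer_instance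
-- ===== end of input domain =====

-- B replaces A's two position-queues and index comparison by a single char deque with
-- two pending-ban counters and surviving-party counts (same O(n) cost, no positions kept).

-- ===== PORT A =====
-- while radiant and dire: pop both fronts, the smaller position survives and re-queues at pos+n
def pvALoop (n : Int) (R D : List Int) : Bool :=
  match R, D with
  | r :: R', d :: D' =>
      if r < d then pvALoop n (R' ++ [r + n]) D'
      else pvALoop n (R') (D' ++ [d + n])
  | _, _ => !R.isEmpty
termination_by R.length + D.length
decreasing_by all_goals simp

def predictPartyVictory_queue_simulation (senate : String) : String :=
  let cs := senate.toList
  let n : Int := cs.length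
  let qs := (PySem.List.enumerate cs).foldl
      (fun (rd : List Int × List Int) ic =>
        if ic.2 = 'R' then (rd.1 ++ [ic.1], rd.2) else (rd.1, rd.2 ++ [ic.1]))
      ([], [])
  if pvALoop n qs.1 qs.2 then "Radiant" else "Dire"

-- ===== PORT B =====
-- single queue of party chars; rb/db = pending bans, rc/dc = surviving counts
def pvBLoop (q : List Char) (rb db rc dc : Nat) : Bool :=
  if 0 < rc ∧ 0 < dc then
    match q with
    | [] => false   -- unreachable for states reachable from a real senate (guard for totality)
    | c :: q' =>
      if c = 'R' then
        if 0 < rb then pvBLoop q' (rb - 1) db rc dc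
        else pvBLoop (q' ++ [c]) rb (db + 1) rc (dc - 1)
      else
        if 0 < db then pvBLoop (q') rb (db - 1) rc dc
        else pvBLoop (q' ++ [c]) (rb + 1) db (rc - 1) dc
  else decide (0 < rc)
termination_by rb + db + 2 * (rc + dc)
decreasing_by all_goals omega

def predictPartyVictory_queue_simulation_alt (senate : String) : String :=
  let cs := senate.toList
  let rc := cs.countP (fun c => c == 'R')
  let dc := cs.length - rc
  if pvBLoop cs 0 0 rc dc then "Radiant" else "Dire"

-- ===== PRECONDITION & SPEC =====
def Spec_predictPartyVictory_queue_simulation (senate : String) (out : String) : Prop := out = predictPartyVictory_queue_simulation_alt senate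
instance (senate : String) (out : String) : Decidable (Spec_predictPartyVictory_queue_simulation senate out) := by unfold Spec_predictPartyVictory_queue_simulation; infer_instance

-- ===== CLAIM (what is proved, stated in full; the proofs are below) =====
def Claim_equal_predictPartyVictory_queue_simulation : Prop := ∀ (senate : String), Dom_predictPartyVictory_queue_simulation senate → Spec_predictPartyVictory_queue_simulation senate (predictPartyVictory_queue_simulation senate)

-- ===== LEMMAS AND PROOFS =====

-- positions of the surviving-R / surviving-D senators in a position-annotated queue
def pvPosR (L : List (Int × Char)) : List Int := (L.filter (fun x => x.2 == 'R')).map Prod.fst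
def pvPosD (L : List (Int × Char)) : List Int := (L.filter (fun x => !(x.2 == 'R'))).map Prod.fst

lemma pvFoldInit (l : List (Int × Char)) :
    ∀ (a b : List Int),
      l.foldl (fun (rd : List Int × List Int) ic =>
        if ic.2 = 'R' then (rd.1 ++ [ic.1], rd.2) else (rd.1, rd.2 ++ [ic.1])) (a, b)
      = (a ++ pvPosR l, b ++ pvPosD l) := by
  induction l with
  | nil => simp [pvPosR, pvPosD]
  | cons x l ih =>
      intro a b
      by_cases hx : x.2 = 'R' <;>
        simp [pvPosR, pvPosD, hx, ih]

-- evaluation lemmas for the two loops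
lemma pvALoop_nil_left (n : Int) (D : List Int) : pvALoop n [] D = false := by
  cases D <;> simp [pvALoop]

lemma pvALoop_nil_right (n : Int) (R : List Int) : pvALoop n R [] = !R.isEmpty := by
  cases R <;> simp [pvALoop]

lemma pvBLoop_exit (q : List Char) (rb db rc dc : Nat) (h : ¬ (0 < rc ∧ 0 < dc)) :
    pvBLoop q rb db rc dc = decide (0 < rc) := by
  rw [pvBLoop.eq_def, if_neg h]

lemma pvBLoop_R_flush (q' : List Char) (rb db rc dc : Nat)
    (h : 0 < rc ∧ 0 < dc) (hrb : 0 < rb) :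
    pvBLoop ('R' :: q') rb db rc dc = pvBLoop q' (rb - 1) db rc dc := by
  rw [pvBLoop.eq_def, if_pos h]; simp [hrb]

lemma pvBLoop_R_act (q' : List Char) (db rc dc : Nat)
    (h : 0 < rc ∧ 0 < dc) :
    pvBLoop ('R' :: q') 0 db rc dc = pvBLoop (q' ++ ['R']) 0 (db + 1) rc (dc - 1) := by
  rw [pvBLoop.eq_def, if_pos h]; simp

lemma pvBLoop_D_flush (c : Char) (q' : List Char) (rb db rc dc : Nat)
    (h : 0 < rc ∧ 0 < dc) (hc : ¬ c = 'R') (hdb : 0 < db) :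
    pvBLoop (c :: q') rb db rc dc = pvBLoop q' rb (db - 1) rc dc := by
  rw [pvBLoop.eq_def, if_pos h]; simp [hc, hdb]

lemma pvBLoop_D_act (c : Char) (q' : List Char) (rb rc dc : Nat)
    (h : 0 < rc ∧ 0 < dc) (hc : ¬ c = 'R') :
    pvBLoop (c :: q') rb 0 rc dc = pvBLoop (q' ++ [c]) (rb + 1) 0 (rc - 1) dc := by
  rw [pvBLoop.eq_def, if_pos h]; simp [hc]

-- membership in the projected position lists
lemma pvPosR_mem {L : List (Int × Char)} {r : Int} (h : r ∈ pvPosR L) :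
    ∃ x ∈ L, x.1 = r := by
  obtain ⟨x, hx, rfl⟩ := List.mem_map.1 h
  exact ⟨x, List.mem_of_mem_filter hx, rfl⟩

lemma pvPosD_mem {L : List (Int × Char)} {d : Int} (h : d ∈ pvPosD L) :
    ∃ x ∈ L, x.1 = d := by
  obtain ⟨x, hx, rfl⟩ := List.mem_map.1 h
  exact ⟨x, List.mem_of_mem_filter hx, rfl⟩

lemma pvDropSucc {α : Type} (l : List α) (k : Nat) (a : α) (t : List α)
    (h : l.drop k = a :: t) : l.drop (k + 1) = t := by
  rw [← List.tail_drop, h]; rfl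

-- the bisimulation: A's two-queue state is the banned-prefix view of B's one-queue state
lemma pvLoopSim (n : Int) (hn : 0 < n) :
    ∀ (N : Nat) (L : List (Int × Char)) (rb db : Nat),
      rb + db + 2 * (((pvPosR L).length - rb) + ((pvPosD L).length - db)) ≤ N →
      L.Pairwise (fun a b => a.1 < b.1) →
      (∀ a ∈ L, ∀ b ∈ L, b.1 < a.1 + n) →
      rb ≤ (pvPosR L).length → db ≤ (pvPosD L).length →
      pvALoop n ((pvPosR L).drop rb) ((pvPosD L).drop db)
        = pvBLoop (L.map Prod.snd) rb db ((pvPosR L).length - rb) ((pvPosD L).length - db) := by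
  intro N
  induction N with
  | zero =>
      intro L rb db hm _hs _hw hrb hdb
      have hR : (pvPosR L).drop rb = [] := List.drop_eq_nil_of_le (by omega)
      have hD : (pvPosD L).drop db = [] := List.drop_eq_nil_of_le (by omega)
      rw [hR, hD, pvALoop_nil_left, pvBLoop_exit _ _ _ _ _ (by omega)]
      simp; omega
  | succ N ih =>
      intro L rb db hm hs hw hrb hdb
      by_cases hg : 0 < (pvPosR L).length - rb ∧ 0 < (pvPosD L).length - db
      · -- both parties still alive: L is nonempty, examine its front
        obtain ⟨hrc, hdc⟩ := hg
        cases L with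
        | nil => simp [pvPosR] at hrc
        | cons hd L' =>
        obtain ⟨p, c⟩ := hd
        rw [List.pairwise_cons] at hs
        obtain ⟨hhead, hs'⟩ := hs
        have hw' : ∀ a ∈ L', ∀ b ∈ L', b.1 < a.1 + n := fun a ha b hb =>
          hw a (List.mem_cons_of_mem _ ha) b (List.mem_cons_of_mem _ hb)
        have hwin : ∀ b ∈ L', b.1 < p + n := fun b hb =>
          hw (p, c) List.mem_cons_self b (List.mem_cons_of_mem _ hb)
        by_cases hc : c = 'R'
        · subst hc
          have hpr : pvPosR ((p, 'R') :: L') = p :: pvPosR L' := by simp [pvPosR]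
          have hpd : pvPosD ((p, 'R') :: L') = pvPosD L' := by simp [pvPosD]
          simp only [hpr, hpd] at hm hrc hdc hrb hdb ⊢
          simp only [List.length_cons] at hm hrc hrb ⊢
          simp only [List.map_cons]
          by_cases hrbpos : 0 < rb
          · -- the front R senator was banned: drop it, A's state is unchanged
            obtain ⟨rb', rfl⟩ : ∃ rb', rb = rb' + 1 := ⟨rb - 1, by omega⟩
            rw [pvBLoop_R_flush _ _ _ _ _ ⟨by omega, hdc⟩ hrbpos, List.drop_succ_cons]
            have e1 : (pvPosR L').length + 1 - (rb' + 1) = (pvPosR L').length - rb' := by omega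
            have e2 : rb' + 1 - 1 = rb' := by omega
            rw [e1, e2]
            exact ih L' rb' db (by omega) hs' hw' (by omega) hdb
          · -- the front R senator acts: he bans the earliest surviving D senator
            obtain rfl : rb = 0 := by omega
            rw [List.drop_zero]
            cases hD : (pvPosD L').drop db with
            | nil =>
                exfalso
                have := congrArg List.length hD
                simp at this; omega
            | cons d Dt =>
                have hpd' : p < d := by
                  obtain ⟨x, hx, rfl⟩ := pvPosD_mem (List.drop_subset _ _ (hD ▸ List.mem_cons_self))
                  exact hhead x hx
                rw [pvALoop, if_pos hpd', pvBLoop_R_act _ _ _ _ ⟨by omega, hdc⟩]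
                have h2r : pvPosR (L' ++ [(p + n, 'R')]) = pvPosR L' ++ [p + n] := by
                  simp [pvPosR]
                have h2d : pvPosD (L' ++ [(p + n, 'R')]) = pvPosD L' := by
                  simp [pvPosD]
                have key := ih (L' ++ [(p + n, 'R')]) 0 (db + 1)
                  (by rw [h2r, h2d]; simp; omega)
                  (by
                    rw [List.pairwise_append]
                    refine ⟨hs', by simp, ?_⟩
                    intro a ha b hb
                    simp at hb; subst hb
                    exact hwin a ha)
                  (by
                    intro a ha b hb
                    simp at ha hb
                    rcases ha with ha | ha <;> rcases hb with hb | hb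
                    · exact hw' a ha b hb
                    · obtain rfl := hb; simpa using hhead a ha
                    · obtain rfl := ha
                      have := hwin b hb; simp; omega
                    · obtain rfl := ha; obtain rfl := hb; simp; omega)
                  (by omega)
                  (by rw [h2d]; omega)
                rw [h2r, h2d, List.drop_zero, pvDropSucc _ _ _ _ hD] at key
                simp only [List.map_append, List.map_cons, List.map_nil] at key
                simp only [List.length_append, List.length_cons, List.length_nil] at key ⊢
                have e1 : (pvPosR L').length + 1 - 0 = (pvPosR L').length + (0 + 1) - 0 := by omega
                have e2 : (pvPosD L').length - db - 1 = (pvPosD L').length - (db + 1) := by omega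
                rw [e1, e2]
                exact key
        · -- front senator is from Dire
          have hpr : pvPosR ((p, c) :: L') = pvPosR L' := by simp [pvPosR, hc]
          have hpd : pvPosD ((p, c) :: L') = p :: pvPosD L' := by simp [pvPosD, hc]
          simp only [hpr, hpd] at hm hrc hdc hrb hdb ⊢
          simp only [List.length_cons] at hm hdc hdb ⊢
          simp only [List.map_cons]
          by_cases hdbpos : 0 < db
          · obtain ⟨db', rfl⟩ : ∃ db', db = db' + 1 := ⟨db - 1, by omega⟩
            rw [pvBLoop_D_flush _ _ _ _ _ _ ⟨hrc, by omega⟩ hc hdbpos, List.drop_succ_cons]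
            have e1 : (pvPosD L').length + 1 - (db' + 1) = (pvPosD L').length - db' := by omega
            have e2 : db' + 1 - 1 = db' := by omega
            rw [e1, e2]
            exact ih L' rb db' (by omega) hs' hw' hrb (by omega)
          · obtain rfl : db = 0 := by omega
            rw [List.drop_zero]
            cases hR : (pvPosR L').drop rb with
            | nil =>
                exfalso
                have := congrArg List.length hR
                simp at this; omega
            | cons r Rt =>
                have hpr' : ¬ r < p := by
                  obtain ⟨x, hx, rfl⟩ := pvPosR_mem (List.drop_subset _ _ (hR ▸ List.mem_cons_self))
                  have := hhead x hx; omega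
                rw [pvALoop, if_neg hpr', pvBLoop_D_act _ _ _ _ _ ⟨hrc, by omega⟩ hc]
                have h2r : pvPosR (L' ++ [(p + n, c)]) = pvPosR L' := by
                  simp [pvPosR, hc]
                have h2d : pvPosD (L' ++ [(p + n, c)]) = pvPosD L' ++ [p + n] := by
                  simp [pvPosD, hc]
                have key := ih (L' ++ [(p + n, c)]) (rb + 1) 0
                  (by rw [h2r, h2d]; simp; omega)
                  (by
                    rw [List.pairwise_append]
                    refine ⟨hs', by simp, ?_⟩
                    intro a ha b hb
                    simp at hb; subst hb
                    exact hwin a ha)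
                  (by
                    intro a ha b hb
                    simp at ha hb
                    rcases ha with ha | ha <;> rcases hb with hb | hb
                    · exact hw' a ha b hb
                    · obtain rfl := hb; simpa using hhead a ha
                    · obtain rfl := ha
                      have := hwin b hb; simp; omega
                    · obtain rfl := ha; obtain rfl := hb; simp; omega)
                  (by rw [h2r]; omega)
                  (by omega)
                rw [h2r, h2d, List.drop_zero, pvDropSucc _ _ _ _ hR] at key
                simp only [List.map_append, List.map_cons, List.map_nil] at key
                simp only [List.length_append, List.length_cons, List.length_nil] at key ⊢
                have e1 : (pvPosD L').length + 1 - 0 = (pvPosD L').length + (0 + 1) - 0 := by omega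
                have e2 : (pvPosR L').length - rb - 1 = (pvPosR L').length - (rb + 1) := by omega
                rw [e1, e2]
                exact key
      · -- a party is extinct: both loops stop and report whether Radiant survives
        rw [pvBLoop_exit _ _ _ _ _ hg]
        rcases Nat.lt_or_ge rb (pvPosR L).length with h | h
        · have hD : (pvPosD L).drop db = [] := List.drop_eq_nil_of_le (by omega)
          rw [hD, pvALoop_nil_right]
          cases hRs : (pvPosR L).drop rb with
          | nil =>
              exfalso
              have := congrArg List.length hRs
              simp at this; omega
          | cons r Rt => simp; omega
        · have hRs : (pvPosR L).drop rb = [] := List.drop_eq_nil_of_le h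
          rw [hRs, pvALoop_nil_left]
          simp; omega

-- the two simulations agree from the initial state
lemma pvPosR_enum_len (cs : List Char) :
    (pvPosR (PySem.List.enumerate cs)).length = cs.countP (fun c => c == 'R') := by
  rw [pvPosR, List.length_map, ← List.countP_eq_length_filter]
  conv_rhs => rw [← PySem.List.map_snd_enumerate cs 0]
  rw [List.countP_map]
  rfl

lemma pvPosD_enum_len (cs : List Char) :
    (pvPosD (PySem.List.enumerate cs)).length = cs.length - cs.countP (fun c => c == 'R') := by
  rw [pvPosD, List.length_map, ← List.countP_eq_length_filter]
  have h := List.length_eq_countP_add_countP (fun x : Int × Char => x.2 == 'R')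
    (l := PySem.List.enumerate cs)
  have h2 : (PySem.List.enumerate cs (0 : Int)).length = cs.length := by
    conv_rhs => rw [← PySem.List.map_snd_enumerate cs 0]
    rw [List.length_map]
  have h3 := pvPosR_enum_len cs
  rw [pvPosR, List.length_map, ← List.countP_eq_length_filter] at h3
  have h4 : List.countP (fun x : Int × Char => decide ¬((fun x : Int × Char => x.2 == 'R') x = true))
      (PySem.List.enumerate cs) = List.countP (fun x : Int × Char => !(x.2 == 'R'))
      (PySem.List.enumerate cs) := by
    apply List.countP_congr
    intro x _
    simp
  rw [h4] at h
  omega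

lemma pvMainEq (cs : List Char) :
    (if pvALoop cs.length
        ((PySem.List.enumerate cs).foldl
          (fun (rd : List Int × List Int) ic =>
            if ic.2 = 'R' then (rd.1 ++ [ic.1], rd.2) else (rd.1, rd.2 ++ [ic.1]))
          ([], [])).1
        ((PySem.List.enumerate cs).foldl
          (fun (rd : List Int × List Int) ic =>
            if ic.2 = 'R' then (rd.1 ++ [ic.1], rd.2) else (rd.1, rd.2 ++ [ic.1]))
          ([], [])).2
      then "Radiant" else "Dire")
    = (if pvBLoop cs 0 0 (cs.countP (fun c => c == 'R'))
          (cs.length - cs.countP (fun c => c == 'R'))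
        then "Radiant" else "Dire") := by
  rw [pvFoldInit]
  simp only [List.nil_append]
  cases hcs : cs with
  | nil => simp [pvPosR, pvPosD, pvALoop_nil_left, pvBLoop_exit]
  | cons x xs =>
      rw [← hcs]
      have hn : (0 : Int) < cs.length := by rw [hcs]; simp
      have hsim := pvLoopSim (cs.length) hn
        (0 + 0 + 2 * (((pvPosR (PySem.List.enumerate cs)).length - 0)
          + ((pvPosD (PySem.List.enumerate cs)).length - 0)))
        (PySem.List.enumerate cs) 0 0 (le_refl _)
        (PySem.List.pairwise_lt_enumerate cs 0)
        (by
          intro a ha b hb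
          rw [PySem.List.mem_enumerate_iff] at ha hb
          obtain ⟨k, hk, rfl⟩ := ha
          obtain ⟨k', hk', rfl⟩ := hb
          simp
          omega)
        (Nat.zero_le _) (Nat.zero_le _)
      rw [List.drop_zero, List.drop_zero] at hsim
      have hms : List.map Prod.snd (PySem.List.enumerate cs (0 : Int)) = cs :=
        PySem.List.map_snd_enumerate cs 0
      simp only [hsim, hms, pvPosR_enum_len, pvPosD_enum_len, Nat.sub_zero]

-- ===== VERDICT (by name: the statement is the Claim_ definition above) =====
theorem predictPartyVictory_queue_simulation_spec : Claim_equal_predictPartyVictory_queue_simulation := by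
  intro senate _hdom
  unfold Spec_predictPartyVictory_queue_simulation
  simp only [predictPartyVictory_queue_simulation, predictPartyVictory_queue_simulation_alt]
  rw [pvMainEq senate.toList]
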